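-- pv_equiv track=rewrite | github.com/AsakuraAOI/Hypoc | core/comparison.py | parse_checkdata
-- ===== SOURCE A (Python) =====
-- from typing import List, Tuple, Dict, Optional
--
-- def parse_checkdata(content: str) -> List[Tuple[str, str]]:
--     """
--     解析checkdata文件
--     格式: [case_id]\ninput_lines...\n[case_id]\n...
--     Returns: [(case_id, input_text), ...]
--     """
--     inputs = []
--     lines = content.replace('\r\n', '\n').replace('\r', '\n').split('\n')
--     i = 0
--     while i < len(lines):
--         line = lines[i].strip()
--         if line.startswith('[') and line.endswith(']'):
--             case_id = line[1:-1]
--             i += 1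
--             input_lines = []
--             while i < len(lines):
--                 next_line = lines[i].strip()
--                 if next_line.startswith('[') and next_line.endswith(']'):
--                     i -= 1
--                     break
--                 if next_line:
--                     input_lines.append(next_line)
--                 i += 1
--             inputs.append((case_id, '\n'.join(input_lines)))
--         else:
--             i += 1
--     return inputs
-- ===== SOURCE B (Python) =====
-- def parse_checkdata(content: str):
--     inputs = []
--     case_id = None
--     input_lines = []
--     for raw in content.replace('\r\n', '\n').replace('\r', '\n').split('\n'):
--         line = raw.strip()
--         if line.startswith('[') and line.endswith(']'):
--             if case_id is not None:
--                 inputs.append((case_id, '\n'.join(input_lines)))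
--             case_id = line[1:-1]
--             input_lines = []
--         elif case_id is not None and line:
--             input_lines.append(line)
--     if case_id is not None:
--         inputs.append((case_id, '\n'.join(input_lines)))
--     return inputs
-- ===== Notes on version B (the rewrite author's own statement) =====
-- stated objective: simpler
-- what changed: Replaces the nested while-loops with index backtracking (i -= 1 re-examination) by one flat pass over the lines threading (current case_id, buffered input lines) and flushing on each new header and at EOF; Pre_ excludes inputs with two adjacent header lines, on which A loops forever (diverges) while B returns normally.
import Mathlib
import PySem

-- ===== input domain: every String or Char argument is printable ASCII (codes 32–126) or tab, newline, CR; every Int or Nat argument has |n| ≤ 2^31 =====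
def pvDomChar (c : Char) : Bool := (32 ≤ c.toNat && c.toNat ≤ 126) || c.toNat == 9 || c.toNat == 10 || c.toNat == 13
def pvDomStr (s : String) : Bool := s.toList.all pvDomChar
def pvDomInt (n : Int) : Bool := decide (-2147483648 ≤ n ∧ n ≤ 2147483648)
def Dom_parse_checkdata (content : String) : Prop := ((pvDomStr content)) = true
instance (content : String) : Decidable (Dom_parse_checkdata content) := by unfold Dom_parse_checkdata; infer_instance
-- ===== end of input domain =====

-- B replaces A's nested while-loops with i -= 1 backtracking by one flat pass threading
-- (current case_id, buffered lines); objective: simpler.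

-- ===== PORT A =====
-- inner while loop: collect non-empty stripped lines until the next [header] (then back up one) or EOF
def pvInnerA (lines : List String) (i : Nat) (buf : List String) : Nat × List String :=
  if h : i < lines.length then
    if PySem.Str.startswith (PySem.Str.strip lines[i]) "[" = true ∧
        PySem.Str.endswith (PySem.Str.strip lines[i]) "]" = true then
      (i - 1, buf)
    else
      pvInnerA lines (i + 1)
        (if PySem.Str.strip lines[i] ≠ "" then buf ++ [PySem.Str.strip lines[i]] else buf)
  else (i, buf)
termination_by lines.length - i

-- outer while loop; fuel only guards totality (the Python A diverges on adjacent header lines)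
def pvOuterA (lines : List String) (fuel : Nat) (i : Nat) (acc : List (String × String)) :
    List (String × String) :=
  match fuel with
  | 0 => acc
  | fuel + 1 =>
    if h : i < lines.length then
      if PySem.Str.startswith (PySem.Str.strip lines[i]) "[" = true ∧
          PySem.Str.endswith (PySem.Str.strip lines[i]) "]" = true then
        pvOuterA lines fuel (pvInnerA lines (i + 1) []).1
          (acc ++ [(PySem.Str.slice (PySem.Str.strip lines[i]) (some 1) (some (-1)),
                    PySem.Str.join "\n" (pvInnerA lines (i + 1) []).2)])
      else
        pvOuterA lines fuel (i + 1) acc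
    else acc

def parse_checkdata (content : String) : List (String × String) :=
  let lines := (PySem.Str.split? (PySem.Str.replace (PySem.Str.replace content "\r\n" "\n") "\r" "\n") "\n").getD []
  pvOuterA lines (lines.length + 2) 0 []

-- ===== PORT B =====
-- flush the pending case, if any (B does this on each new header and once at EOF)
def pvFlushB (st : List (String × String) × Option String × List String) :
    List (String × String) :=
  match st.2.1 with
  | some c => st.1 ++ [(c, PySem.Str.join "\n" st.2.2)]
  | none => st.1

-- one step of B's flat for-loop; state = (emitted cases, current case_id, buffered lines)
def pvStepB (st : List (String × String) × Option String × List String) (raw : String) :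
    List (String × String) × Option String × List String :=
  if PySem.Str.startswith (PySem.Str.strip raw) "[" = true ∧
      PySem.Str.endswith (PySem.Str.strip raw) "]" = true then
    (pvFlushB st, some (PySem.Str.slice (PySem.Str.strip raw) (some 1) (some (-1))), [])
  else if st.2.1.isSome = true ∧ PySem.Str.strip raw ≠ "" then
    (st.1, st.2.1, st.2.2 ++ [PySem.Str.strip raw])
  else st

def parse_checkdata_alt (content : String) : List (String × String) :=
  let lines := (PySem.Str.split? (PySem.Str.replace (PySem.Str.replace content "\r\n" "\n") "\r" "\n") "\n").getD []
  pvFlushB (lines.foldl pvStepB ([], none, []))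

-- ===== PRECONDITION & SPEC =====
def pvHdrP (s : String) : Bool :=
  PySem.Str.startswith (PySem.Str.strip s) "[" && PySem.Str.endswith (PySem.Str.strip s) "]"

def pvNoAdj : List String → Bool
  | a :: b :: rest => (!(pvHdrP a && pvHdrP b)) && pvNoAdj (b :: rest)
  | _ => true

-- Pre_ excludes exactly the inputs whose normalized line list contains two ADJACENT header
-- lines: there A's backtracking (i -= 1) re-enters the same header forever and never returns
-- (diverges), so no return value exists to match; A returns normally on every other input.
def Pre_parse_checkdata (content : String) : Prop :=
  pvNoAdj ((PySem.Str.split? (PySem.Str.replace (PySem.Str.replace content "\r\n" "\n") "\r" "\n") "\n").getD []) = true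
instance (content : String) : Decidable (Pre_parse_checkdata content) := by
  unfold Pre_parse_checkdata; infer_instance

def pvWitness_parse_checkdata : String := "[a]\nx\n[b]\ny"

def Spec_parse_checkdata (content : String) (out : List (String × String)) : Prop :=
  out = parse_checkdata_alt content
instance (content : String) (out : List (String × String)) : Decidable (Spec_parse_checkdata content out) := by
  unfold Spec_parse_checkdata; infer_instance

-- ===== CLAIM (what is proved, stated in full; the proofs are below) =====
def Claim_equal_parse_checkdata : Prop := ∀ (content : String), Dom_parse_checkdata content → Pre_parse_checkdata content → Spec_parse_checkdata content (parse_checkdata content)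

-- ===== LEMMAS AND PROOFS =====

-- the pending-case output, and B's fold written as plain recursion (proof devices)
def pvEmit (o : Option String) (buf : List String) : List (String × String) :=
  match o with
  | some c => [(c, PySem.Str.join "\n" buf)]
  | none => []

def pvBgo (l : List String) (o : Option String) (buf : List String) : List (String × String) :=
  match l with
  | [] => pvEmit o buf
  | raw :: rest =>
    if PySem.Str.startswith (PySem.Str.strip raw) "[" = true ∧
        PySem.Str.endswith (PySem.Str.strip raw) "]" = true then
      pvEmit o buf ++ pvBgo rest (some (PySem.Str.slice (PySem.Str.strip raw) (some 1) (some (-1)))) []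
    else if o.isSome = true ∧ PySem.Str.strip raw ≠ "" then
      pvBgo rest o (buf ++ [PySem.Str.strip raw])
    else
      pvBgo rest o buf

theorem pvHdrP_true_iff (s : String) :
    pvHdrP s = true ↔ (PySem.Str.startswith (PySem.Str.strip s) "[" = true ∧
      PySem.Str.endswith (PySem.Str.strip s) "]" = true) := by
  rw [pvHdrP, Bool.and_eq_true]

theorem pvHdrP_not (s : String) (h : pvHdrP s = false) :
    ¬ (PySem.Str.startswith (PySem.Str.strip s) "[" = true ∧
      PySem.Str.endswith (PySem.Str.strip s) "]" = true) := by
  rw [← pvHdrP_true_iff, h]; exact Bool.false_ne_true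

theorem pvNoAdj_tail (a : String) (l : List String) (h : pvNoAdj (a :: l) = true) :
    pvNoAdj l = true := by
  cases l with
  | nil => rfl
  | cons b rest => simp only [pvNoAdj, Bool.and_eq_true] at h; exact h.2

theorem pvNoAdj_head (a b : String) (l : List String) (h : pvNoAdj (a :: b :: l) = true)
    (ha : pvHdrP a = true) : pvHdrP b = false := by
  simp only [pvNoAdj, Bool.and_eq_true, Bool.not_eq_true', Bool.and_eq_false_iff] at h
  rcases h.1 with h1 | h1
  · rw [ha] at h1; exact Bool.noConfusion h1
  · exact h1

-- B's foldl + final flush equals pvBgo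
theorem pvFoldB_eq (l : List String) :
    ∀ (acc : List (String × String)) (o : Option String) (buf : List String),
    pvFlushB (l.foldl pvStepB (acc, o, buf)) = acc ++ pvBgo l o buf := by
  induction l with
  | nil =>
    intro acc o buf
    cases o <;> simp [pvBgo, pvEmit, pvFlushB]
  | cons raw rest ih =>
    intro acc o buf
    rw [List.foldl_cons, pvBgo]
    by_cases hh : (PySem.Str.startswith (PySem.Str.strip raw) "[" = true ∧
        PySem.Str.endswith (PySem.Str.strip raw) "]" = true)
    · rw [pvStepB, if_pos hh, if_pos hh, ih]
      cases o <;> simp [pvFlushB, pvEmit]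
    · rw [pvStepB, if_neg hh, if_neg hh]
      by_cases hc : (o.isSome = true ∧ PySem.Str.strip raw ≠ "")
      · rw [if_pos hc, if_pos hc, ih]
      · rw [if_neg hc, if_neg hc, ih]

-- A's inner+outer continuation from a pending case (case_id c, buffer buf) equals B from (some c, buf)
theorem pvPend (lines : List String) :
    ∀ (n fuel i : Nat) (c : String) (buf : List String) (acc : List (String × String)),
    lines.length - i ≤ n →
    pvNoAdj (lines.drop i) = true →
    (∀ _ : i < lines.length, pvHdrP lines[i]! = false) →
    lines.length - i + 2 ≤ fuel →
    pvOuterA lines fuel (pvInnerA lines i buf).1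
        (acc ++ [(c, PySem.Str.join "\n" (pvInnerA lines i buf).2)])
    = acc ++ pvBgo (lines.drop i) (some c) buf := by
  intro n
  induction n with
  | zero =>
    intro fuel i c buf acc hn hadj hent hfuel
    have hi : ¬ i < lines.length := by omega
    rw [pvInnerA, dif_neg hi]
    obtain ⟨f, rfl⟩ : ∃ f, fuel = f + 1 := ⟨fuel - 1, by omega⟩
    rw [pvOuterA, dif_neg hi, List.drop_eq_nil_of_le (by omega)]
    simp [pvBgo, pvEmit]
  | succ m ih =>
    intro fuel i c buf acc hn hadj hent hfuel
    by_cases hi : i < lines.length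
    · have hhd : pvHdrP lines[i] = false := by
        have := hent hi; rwa [getElem!_pos lines i hi] at this
      have hcondi := pvHdrP_not _ hhd
      have hdropi : lines.drop i = lines[i] :: lines.drop (i + 1) :=
        List.drop_eq_getElem_cons hi
      rw [pvInnerA, dif_pos hi, if_neg hcondi]
      have hadj1 : pvNoAdj (lines.drop (i + 1)) = true := by
        have h' := hadj; rw [hdropi] at h'; exact pvNoAdj_tail _ _ h'
      -- B takes the matching non-header step at line i
      have hB : pvBgo (lines.drop i) (some c) buf
          = pvBgo (lines.drop (i + 1)) (some c)
              (if PySem.Str.strip lines[i] ≠ "" then buf ++ [PySem.Str.strip lines[i]] else buf) := by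
        rw [hdropi, pvBgo, if_neg hcondi]
        by_cases he : PySem.Str.strip lines[i] = ""
        · rw [if_neg (by simp [he]), if_neg (by simp [he])]
        · rw [if_pos ⟨rfl, he⟩, if_pos (by simp [he])]
      rw [hB]
      by_cases hj : i + 1 < lines.length
      · by_cases hjh : pvHdrP lines[i + 1] = true
        · -- inner stops at the header at i+1 and backs up to i; outer skips i, reopens at i+1
          have hcondj := (pvHdrP_true_iff _).mp hjh
          rw [pvInnerA, dif_pos hj, if_pos hcondj]
          simp only [Nat.add_sub_cancel]
          obtain ⟨f, rfl⟩ : ∃ f, fuel = f + 2 := ⟨fuel - 2, by omega⟩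
          rw [show f + 2 = (f + 1) + 1 from rfl, pvOuterA, dif_pos hi, if_neg hcondi]
          rw [pvOuterA, dif_pos hj, if_pos hcondj]
          have hdropj : lines.drop (i + 1) = lines[i + 1] :: lines.drop (i + 1 + 1) :=
            List.drop_eq_getElem_cons hj
          have hent2 : ∀ _ : i + 1 + 1 < lines.length, pvHdrP lines[i + 1 + 1]! = false := by
            intro h2
            rw [getElem!_pos lines (i + 1 + 1) h2]
            have hd2 : lines.drop (i + 1) = lines[i + 1] :: lines[i + 1 + 1] :: lines.drop (i + 1 + 1 + 1) := by
              rw [hdropj, List.drop_eq_getElem_cons h2]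
            have h' := hadj1; rw [hd2] at h'
            exact pvNoAdj_head _ _ _ h' hjh
          have hadj2 : pvNoAdj (lines.drop (i + 1 + 1)) = true := by
            have h' := hadj1; rw [hdropj] at h'; exact pvNoAdj_tail _ _ h'
          rw [ih f (i + 1 + 1)
            (PySem.Str.slice (PySem.Str.strip lines[i + 1]) (some 1) (some (-1)))
            [] _ (by omega) hadj2 hent2 (by omega)]
          rw [hdropj, pvBgo, if_pos hcondj]
          simp [pvEmit]
        · -- line i+1 is not a header: the inner loop keeps scanning
          have hjh' : pvHdrP lines[i + 1] = false := by
            cases h' : pvHdrP lines[i + 1] with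
            | false => rfl
            | true => exact absurd h' hjh
          have hent1 : ∀ _ : i + 1 < lines.length, pvHdrP lines[i + 1]! = false := by
            intro _; rwa [getElem!_pos lines (i + 1) hj]
          exact ih fuel (i + 1) c _ acc (by omega) hadj1 hent1 (by omega)
      · -- i+1 is past the end
        have hent1 : ∀ _ : i + 1 < lines.length, pvHdrP lines[i + 1]! = false := by
          intro h; exact absurd h hj
        exact ih fuel (i + 1) c _ acc (by omega) hadj1 hent1 (by omega)
    · -- i is past the end: inner returns, outer flushes at EOF
      rw [pvInnerA, dif_neg hi]
      obtain ⟨f, rfl⟩ : ∃ f, fuel = f + 1 := ⟨fuel - 1, by omega⟩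
      rw [pvOuterA, dif_neg hi, List.drop_eq_nil_of_le (by omega)]
      simp [pvBgo, pvEmit]

-- A's outer scan with no pending case equals B from state (none, [])
theorem pvScan (lines : List String) :
    ∀ (n fuel i : Nat) (acc : List (String × String)),
    lines.length - i ≤ n →
    pvNoAdj (lines.drop i) = true →
    lines.length - i + 2 ≤ fuel →
    pvOuterA lines fuel i acc = acc ++ pvBgo (lines.drop i) none [] := by
  intro n
  induction n with
  | zero =>
    intro fuel i acc hn hadj hfuel
    have hi : ¬ i < lines.length := by omega
    obtain ⟨f, rfl⟩ : ∃ f, fuel = f + 1 := ⟨fuel - 1, by omega⟩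
    rw [pvOuterA, dif_neg hi, List.drop_eq_nil_of_le (by omega)]
    simp [pvBgo, pvEmit]
  | succ m ih =>
    intro fuel i acc hn hadj hfuel
    by_cases hi : i < lines.length
    · obtain ⟨f, rfl⟩ : ∃ f, fuel = f + 1 := ⟨fuel - 1, by omega⟩
      rw [pvOuterA, dif_pos hi]
      have hdropi : lines.drop i = lines[i] :: lines.drop (i + 1) :=
        List.drop_eq_getElem_cons hi
      have hadj1 : pvNoAdj (lines.drop (i + 1)) = true := by
        have h' := hadj; rw [hdropi] at h'; exact pvNoAdj_tail _ _ h'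
      by_cases hh : (PySem.Str.startswith (PySem.Str.strip lines[i]) "[" = true ∧
          PySem.Str.endswith (PySem.Str.strip lines[i]) "]" = true)
      · rw [if_pos hh]
        have hent1 : ∀ _ : i + 1 < lines.length, pvHdrP lines[i + 1]! = false := by
          intro h1
          rw [getElem!_pos lines (i + 1) h1]
          have hd : lines.drop i = lines[i] :: lines[i + 1] :: lines.drop (i + 1 + 1) := by
            rw [hdropi, List.drop_eq_getElem_cons h1]
          have h' := hadj; rw [hd] at h'
          exact pvNoAdj_head _ _ _ h' ((pvHdrP_true_iff _).mpr hh)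
        rw [pvPend lines (lines.length - (i + 1)) f (i + 1)
          (PySem.Str.slice (PySem.Str.strip lines[i]) (some 1) (some (-1))) [] _
          (le_refl _) hadj1 hent1 (by omega)]
        rw [hdropi, pvBgo, if_pos hh]
        simp [pvEmit]
      · rw [if_neg hh, ih f (i + 1) acc (by omega) hadj1 (by omega)]
        rw [hdropi, pvBgo, if_neg hh]
        by_cases he : PySem.Str.strip lines[i] = ""
        · rw [if_neg (by simp [he])]
        · rw [if_neg (by simp [he])]
    · obtain ⟨f, rfl⟩ : ∃ f, fuel = f + 1 := ⟨fuel - 1, by omega⟩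
      rw [pvOuterA, dif_neg hi, List.drop_eq_nil_of_le (by omega)]
      simp [pvBgo, pvEmit]

theorem pvMain (lines : List String) (h : pvNoAdj lines = true) :
    pvOuterA lines (lines.length + 2) 0 [] = pvFlushB (lines.foldl pvStepB ([], none, []))  := by
  rw [pvFoldB_eq lines [] none []]
  rw [pvScan lines lines.length (lines.length + 2) 0 [] (by omega) (by simpa using h) (by omega)]
  rw [List.drop_zero]

-- ===== VERDICT (by name: the statement is the Claim_ definition above) =====
theorem parse_checkdata_spec : Claim_equal_parse_checkdata := by
  intro content _hdom hpre
  exact pvMain _ hpre
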